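-- pv_equiv track=rewrite | github.com/snizamaddinov/databases_in_docker | logs-backup/session_exports/parse_visit_log_connect_disconnect.py | extract_dimension_values
-- ===== SOURCE A (Python) =====
-- DIMENSION_PREFIXES = {
--     "config_browser": "browser",
--     "config_os_version": "os_version",
--     "config_os": "os",
--     "config_device_type": "device_type",
--     "config_device_model": "device_model",
--     "country": "country",
--     "city": "city",
--     "ip": "ip",
--     "userAgent": "user_agent",
--     "path": "path_from_bucket",
-- }
--
-- DIMENSION_PREFIX_ORDER = sorted(DIMENSION_PREFIXES.keys(), key=len, reverse=True)
--
-- def extract_dimension_values(bucket):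
--     values = {field_name: "" for field_name in DIMENSION_PREFIXES.values()}
--     if not isinstance(bucket, list):
--         return values
--
--     for item in bucket:
--         if not isinstance(item, str):
--             continue
--         for prefix in DIMENSION_PREFIX_ORDER:
--             token = f"{prefix}-"
--             if item.startswith(token):
--                 values[DIMENSION_PREFIXES[prefix]] = item[len(token) :]
--                 break
--
--     return values
-- ===== SOURCE B (Python) =====
-- DIMENSION_PREFIXES = {
--     "config_browser": "browser",
--     "config_os_version": "os_version",
--     "config_os": "os",
--     "config_device_type": "device_type",
--     "config_device_model": "device_model",
--     "country": "country",
--     "city": "city",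
--     "ip": "ip",
--     "userAgent": "user_agent",
--     "path": "path_from_bucket",
-- }
--
-- def extract_dimension_values(bucket):
--     values = {field_name: "" for field_name in DIMENSION_PREFIXES.values()}
--     if not isinstance(bucket, list):
--         return values
--
--     for item in bucket:
--         if not isinstance(item, str):
--             continue
--         parts = item.split("-", 1)
--         if len(parts) == 2 and parts[0] in DIMENSION_PREFIXES:
--             values[DIMENSION_PREFIXES[parts[0]]] = parts[1]
--
--     return values
-- ===== Notes on version B (the rewrite author's own statement) =====
-- stated objective: idiomatic
-- what changed: The inner loop over the length-sorted prefix list with a startswith test per prefix is replaced by one split('-', 1) per item followed by a single dict lookup of the part before the first dash (no dimension prefix contains a dash, so the two matching rules coincide).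
import Mathlib
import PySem

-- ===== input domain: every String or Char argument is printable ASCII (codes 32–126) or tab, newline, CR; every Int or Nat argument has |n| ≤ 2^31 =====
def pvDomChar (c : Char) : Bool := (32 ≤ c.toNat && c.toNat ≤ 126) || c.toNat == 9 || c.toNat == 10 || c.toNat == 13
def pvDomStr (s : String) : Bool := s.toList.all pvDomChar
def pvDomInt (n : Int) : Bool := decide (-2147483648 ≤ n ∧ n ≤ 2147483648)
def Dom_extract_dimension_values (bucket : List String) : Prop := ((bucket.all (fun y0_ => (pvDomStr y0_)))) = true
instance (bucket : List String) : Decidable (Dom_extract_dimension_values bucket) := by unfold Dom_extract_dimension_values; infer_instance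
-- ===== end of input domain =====

-- B replaces A's inner loop over the length-sorted prefix list (a startswith test per
-- prefix) by one split('-', 1) per item plus a single dict lookup of the piece before the
-- first dash; since no prefix contains a dash the two matching rules coincide (idiomatic).

-- ===== PORT A =====

-- module constant DIMENSION_PREFIXES (shared by A and B, as in the Python sources)
def pvDimensionPrefixes : PySem.Dict String String := PySem.Dict.ofList
  [("config_browser", "browser"),
   ("config_os_version", "os_version"),
   ("config_os", "os"),
   ("config_device_type", "device_type"),
   ("config_device_model", "device_model"),
   ("country", "country"),
   ("city", "city"),
   ("ip", "ip"),
   ("userAgent", "user_agent"),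
   ("path", "path_from_bucket")]

-- module constant DIMENSION_PREFIX_ORDER = sorted(DIMENSION_PREFIXES.keys(), key=len, reverse=True)
def pvDimensionPrefixOrder : List String :=
  PySem.List.sorted pvDimensionPrefixes.keys (fun s => PySem.Str.len s) true

-- values = {field_name: "" for field_name in DIMENSION_PREFIXES.values()}  (identical line in A and in B)
def pvInitValues : PySem.Dict String String :=
  pvDimensionPrefixes.values.foldl (fun d field_name => d.insert field_name "") (PySem.Dict.ofList [])

-- A's inner 'for prefix in DIMENSION_PREFIX_ORDER: … break'
def pvExtractInner : List String → PySem.Dict String String → String → PySem.Dict String String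
  | [], values, _ => values
  | pfx :: rest, values, item =>
    if PySem.Str.startswith item (pfx ++ "-") then
      values.insert (pvDimensionPrefixes.getD pfx "")
        (PySem.Str.slice item (some (PySem.Str.len (pfx ++ "-"))) none)
    else pvExtractInner rest values item

-- the isinstance checks are identically true under the List String signature
def extract_dimension_values (bucket : List String) : List (String × String) :=
  (bucket.foldl (fun values item => pvExtractInner pvDimensionPrefixOrder values item)
    pvInitValues).items

-- ===== PORT B =====

-- parts = item.split('-', 1); if len(parts) == 2 and parts[0] in DIMENSION_PREFIXES: …
def pvSplitStep (values : PySem.Dict String String) (item : String) : PySem.Dict String String :=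
  match PySem.Str.splitMax? item "-" 1 with
  | none => values  -- unreachable: the separator "-" is non-empty
  | some [p0, p1] =>
      if pvDimensionPrefixes.contains p0 then
        values.insert (pvDimensionPrefixes.getD p0 "") p1
      else values
  | some _ => values

def extract_dimension_values_alt (bucket : List String) : List (String × String) :=
  (bucket.foldl pvSplitStep pvInitValues).items

-- ===== PRECONDITION & SPEC =====
def Spec_extract_dimension_values (bucket : List String) (out : List (String × String)) : Prop := out = extract_dimension_values_alt bucket
instance (bucket : List String) (out : List (String × String)) : Decidable (Spec_extract_dimension_values bucket out) := by unfold Spec_extract_dimension_values; infer_instance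

-- ===== CLAIM (what is proved, stated in full; the proofs are below) =====
def Claim_equal_extract_dimension_values : Prop := ∀ (bucket : List String), Dom_extract_dimension_values bucket → Spec_extract_dimension_values bucket (extract_dimension_values bucket)

-- ===== LEMMAS AND PROOFS =====

-- splitOnMax.go walks a dash-free list to its end without splitting
theorem pv_go_no_dash (l cur : List Char) (acc : List (List Char)) (fuel : Nat)
    (hf : l.length < fuel) (hd : '-' ∉ l) :
    PySem.Chars.splitOnMax.go ['-'] fuel 1 l cur acc = ((cur.reverse ++ l) :: acc).reverse := by
  induction l generalizing cur fuel with
  | nil =>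
    cases fuel with
    | zero => omega
    | succ f => simp [PySem.Chars.splitOnMax.go]
  | cons c rest ih =>
    cases fuel with
    | zero => omega
    | succ f =>
      rw [PySem.Chars.splitOnMax.go]
      have hc : c ≠ '-' := fun h => hd (h ▸ List.mem_cons_self ..)
      have hp : List.isPrefixOf ['-'] (c :: rest) = false := by
        simp [List.isPrefixOf]; intro h; exact absurd h.symm hc
      simp only [hp, if_neg (by omega : ¬(1 = 0))]
      rw [ih (c :: cur) f (by simpa using Nat.lt_of_succ_lt_succ hf)
        (fun h => hd (List.mem_cons_of_mem _ h))]
      simp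

-- splitOnMax.go with maxsplit 1 splits exactly at the first dash
theorem pv_go_dash (pre suf cur : List Char) (acc : List (List Char)) (fuel : Nat)
    (hf : pre.length < fuel) (hd : '-' ∉ pre) :
    PySem.Chars.splitOnMax.go ['-'] fuel 1 (pre ++ '-' :: suf) cur acc =
      ((cur.reverse ++ pre) :: acc).reverse ++ [suf] := by
  induction pre generalizing cur fuel with
  | nil =>
    cases fuel with
    | zero => omega
    | succ f =>
      simp only [List.nil_append]
      rw [PySem.Chars.splitOnMax.go]
      have hp : List.isPrefixOf ['-'] ('-' :: suf) = true := by simp [List.isPrefixOf]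
      simp only [hp, if_neg (by omega : ¬(1 = 0)), if_true]
      cases f with
      | zero => simp [PySem.Chars.splitOnMax.go]
      | succ f' =>
        cases suf with
        | nil => simp [PySem.Chars.splitOnMax.go]
        | cons s ss => simp [PySem.Chars.splitOnMax.go]
  | cons c rest ih =>
    cases fuel with
    | zero => omega
    | succ f =>
      simp only [List.cons_append]
      rw [PySem.Chars.splitOnMax.go]
      have hc : c ≠ '-' := fun h => hd (h ▸ List.mem_cons_self ..)
      have hp : List.isPrefixOf ['-'] (c :: (rest ++ '-' :: suf)) = false := by
        simp [List.isPrefixOf]; intro h; exact absurd h.symm hc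
      simp only [hp, if_neg (by omega : ¬(1 = 0))]
      rw [ih (c :: cur) f (by simpa using Nat.lt_of_succ_lt_succ hf)
        (fun h => hd (List.mem_cons_of_mem _ h))]
      simp

theorem pv_splitMax_no_dash (s : String) (hd : '-' ∉ s.toList) :
    PySem.Str.splitMax? s "-" 1 = some [s] := by
  simp only [PySem.Str.splitMax?, PySem.Chars.splitMax?, PySem.Chars.splitOnMax,
    show ("-" : String).toList = ['-'] from by decide]
  rw [if_neg (by decide), if_neg (by decide)]
  simp only [Int.toNat_one]
  rw [pv_go_no_dash s.toList [] [] (s.toList.length + 1) (by omega) hd]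
  simp [String.ofList_toList]

theorem pv_splitMax_dash (s : String) (pre suf : List Char)
    (hs : s.toList = pre ++ '-' :: suf) (hd : '-' ∉ pre) :
    PySem.Str.splitMax? s "-" 1 = some [String.ofList pre, String.ofList suf] := by
  simp only [PySem.Str.splitMax?, PySem.Chars.splitMax?, PySem.Chars.splitOnMax, hs,
    show ("-" : String).toList = ['-'] from by decide]
  rw [if_neg (by decide), if_neg (by decide)]
  simp only [Int.toNat_one]
  rw [pv_go_dash pre suf [] [] ((pre ++ '-' :: suf).length + 1) (by simp) hd]
  simp

-- any list containing a dash decomposes at its FIRST dash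
theorem pv_first_dash (cs : List Char) (h : '-' ∈ cs) :
    ∃ pre suf, cs = pre ++ '-' :: suf ∧ '-' ∉ pre := by
  induction cs with
  | nil => cases h
  | cons c rest ih =>
    by_cases hc : c = '-'
    · exact ⟨[], rest, by simp [hc], by simp⟩
    · obtain ⟨pre, suf, heq, hpre⟩ :=
        ih ((List.mem_cons.mp h).resolve_left (fun h' => hc h'.symm))
      exact ⟨c :: pre, suf, by simp [heq],
        fun hm => (List.mem_cons.mp hm).elim (fun h' => absurd h'.symm hc) hpre⟩

-- two first-dash decompositions agree
theorem pv_dash_eq (a b x y : List Char) (ha : '-' ∉ a) (hb : '-' ∉ b)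
    (h : a ++ '-' :: x = b ++ '-' :: y) : a = b ∧ x = y := by
  induction a generalizing b with
  | nil =>
    cases b with
    | nil => simpa using h
    | cons c bs =>
      exfalso
      simp only [List.nil_append, List.cons_append, List.cons.injEq] at h
      exact hb (h.1 ▸ List.mem_cons_self ..)
  | cons c as ih =>
    cases b with
    | nil =>
      exfalso
      simp only [List.cons_append, List.nil_append, List.cons.injEq] at h
      exact ha (h.1.symm ▸ List.mem_cons_self ..)
    | cons d bs =>
      simp only [List.cons_append, List.cons.injEq] at h
      obtain ⟨h1, h2⟩ := ih bs (fun hm => ha (List.mem_cons_of_mem _ hm))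
        (fun hm => hb (List.mem_cons_of_mem _ hm)) h.2
      exact ⟨by rw [h.1, h1], h2⟩

-- startswith(prefix + '-') ⟷ the part before the item's first dash IS the prefix
theorem pv_startswith_iff (s p : String) (pre suf : List Char)
    (hs : s.toList = pre ++ '-' :: suf) (hdpre : '-' ∉ pre) (hdp : '-' ∉ p.toList) :
    PySem.Chars.startswith s.toList (p.toList ++ ['-']) = true ↔ p.toList = pre := by
  rw [PySem.Chars.startswith_iff, hs]
  constructor
  · rintro ⟨t, ht⟩
    rw [List.append_assoc] at ht
    exact (pv_dash_eq p.toList pre t suf hdp hdpre (by simpa using ht)).1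
  · intro h
    exact ⟨suf, by rw [h, List.append_assoc]; rfl⟩

theorem pv_startswith_false (s p : String) (hd : '-' ∉ s.toList) :
    PySem.Chars.startswith s.toList (p.toList ++ ['-']) = false := by
  rw [Bool.eq_false_iff]
  intro h
  exact hd (((PySem.Chars.startswith_iff _ _).mp h).subset (by simp))

-- A's inner loop on a dash-free item leaves values unchanged
theorem pv_inner_no_dash (ps : List String) (values : PySem.Dict String String) (s : String)
    (hd : '-' ∉ s.toList) : pvExtractInner ps values s = values := by
  induction ps with
  | nil => rfl
  | cons p rest ih => simp [pvExtractInner, pv_startswith_false s p hd, ih]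

-- A's inner loop on an item with a dash = lookup of the first matching prefix
theorem pv_inner_dash (ps : List String) (values : PySem.Dict String String) (s : String)
    (pre suf : List Char) (hs : s.toList = pre ++ '-' :: suf) (hdpre : '-' ∉ pre)
    (hps : ∀ p ∈ ps, '-' ∉ p.toList) :
    pvExtractInner ps values s =
      match ps.find? (fun p => p.toList == pre) with
      | some p => values.insert (pvDimensionPrefixes.getD p "") (String.ofList suf)
      | none => values := by
  induction ps with
  | nil => rfl
  | cons p rest ih =>
    have hdp : '-' ∉ p.toList := hps p (List.mem_cons_self ..)
    by_cases hm : p.toList = pre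
    · have hsw : PySem.Chars.startswith s.toList (p.toList ++ ['-']) = true :=
        (pv_startswith_iff s p pre suf hs hdpre hdp).mpr hm
      have hval : PySem.Str.slice s (some ((p.length : Int) + 1)) = String.ofList suf := by
        apply String.toList_inj.mp
        rw [PySem.Str.toList_slice, PySem.Chars.slice_eq_listSlice,
          PySem.List.slice_from _ (by omega), hs]
        have hlen : p.length = pre.length := by rw [← hm, String.length_toList]
        simp [String.toList_ofList, hlen]
      rw [List.find?_cons_of_pos (by simp [hm])]
      simp [pvExtractInner, hsw, hval]
    · have hsw : PySem.Chars.startswith s.toList (p.toList ++ ['-']) = false := by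
        rw [Bool.eq_false_iff]
        intro hb
        exact absurd ((pv_startswith_iff s p pre suf hs hdpre hdp).mp hb) hm
      rw [List.find?_cons_of_neg (by simp [hm])]
      simp only [pvExtractInner, PySem.Str.startswith_eq, String.toList_append,
        show ("-" : String).toList = ['-'] from by decide, hsw]
      simp only [Bool.false_eq_true, if_false]
      exact ih (fun q hq => hps q (List.mem_cons_of_mem _ hq))

-- every dimension prefix is dash-free
theorem pv_order_no_dash : ∀ p ∈ pvDimensionPrefixOrder, '-' ∉ p.toList := by
  have h : ∀ p ∈ pvDimensionPrefixes.keys, '-' ∉ p.toList := by decide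
  intro p hp
  exact h p ((PySem.List.mem_sorted _ _ _ _).mp hp)

-- contains ⟷ membership in the sorted prefix order
theorem pv_contains_iff (k : String) :
    pvDimensionPrefixes.contains k = true ↔ k ∈ pvDimensionPrefixOrder := by
  unfold pvDimensionPrefixOrder
  rw [PySem.List.mem_sorted]
  simp [PySem.Dict.contains, PySem.Dict.keys, List.any_eq_true]

-- the per-item steps of A and of B agree
theorem pv_step_eq (values : PySem.Dict String String) (s : String) :
    pvExtractInner pvDimensionPrefixOrder values s = pvSplitStep values s := by
  by_cases hm : '-' ∈ s.toList
  · obtain ⟨pre, suf, hs, hdpre⟩ := pv_first_dash s.toList hm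
    rw [pv_inner_dash pvDimensionPrefixOrder values s pre suf hs hdpre pv_order_no_dash]
    unfold pvSplitStep
    rw [pv_splitMax_dash s pre suf hs hdpre]
    rcases hf : pvDimensionPrefixOrder.find? (fun p => p.toList == pre) with _ | p
    · have hnc : pvDimensionPrefixes.contains (String.ofList pre) = false := by
        cases hb : pvDimensionPrefixes.contains (String.ofList pre)
        · rfl
        · exfalso
          have hmem := (pv_contains_iff _).mp hb
          have := List.find?_eq_none.mp hf _ hmem
          simp [String.toList_ofList] at this
      rw [hf]
      simp [hnc]
    · have hpredicate : p.toList = pre := by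
        have := List.find?_some hf
        simpa using this
      have hpe : p = String.ofList pre := String.toList_inj.mp (by simp [String.toList_ofList, hpredicate])
      have hc : pvDimensionPrefixes.contains (String.ofList pre) = true :=
        (pv_contains_iff _).mpr (hpe ▸ List.mem_of_find?_eq_some hf)
      rw [hf]
      simp [hc, hpe]
  · rw [pv_inner_no_dash pvDimensionPrefixOrder values s hm]
    unfold pvSplitStep
    rw [pv_splitMax_no_dash s hm]

-- ===== VERDICT (by name: the statement is the Claim_ definition above) =====
theorem extract_dimension_values_spec : Claim_equal_extract_dimension_values := by
  intro bucket _hdom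
  unfold Spec_extract_dimension_values extract_dimension_values extract_dimension_values_alt
  congr 1
  rw [show (fun (values : PySem.Dict String String) (item : String) =>
      pvExtractInner pvDimensionPrefixOrder values item) = pvSplitStep from
    funext fun v => funext fun i => pv_step_eq v i]
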